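-- pv_equiv track=rewrite | github.com/Oldgram/SINFEDU | Examen Juin 2019/[Q4] OXO.py | check_hori
-- ===== SOURCE A (Python) =====
-- def check_seq(string):
--     count = 0
--     if string == 'OXO':
--         count += 1
--     return count
--
-- def check_hori(grille):
--     score = 0
--     for lst in grille:
--         string = ''.join(lst)
--         string = [string[i:i + 3] for i in range(0, len(string)-2)]
--         for hseq in string:
--             score += check_seq(hseq)
--     return score
-- ===== SOURCE B (Python) =====
-- def check_hori(grille):
--     total = 0
--     for row in grille:
--         s = ''.join(row)
--         idx = s.find('OXO')
--         while idx != -1: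
--             total += 1
--             s = s[idx + 1:]
--             idx = s.find('OXO')
--     return total
-- ===== Notes on version B (the rewrite author's own statement) =====
-- stated objective: faster
-- what changed: Drops check_seq and the list of 3-character window slices; each row is searched with str.find for the next 'OXO' occurrence, counting it and restarting the search just past the match start, so the per-window Python loop disappears into C-level substring search.
import Mathlib
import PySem

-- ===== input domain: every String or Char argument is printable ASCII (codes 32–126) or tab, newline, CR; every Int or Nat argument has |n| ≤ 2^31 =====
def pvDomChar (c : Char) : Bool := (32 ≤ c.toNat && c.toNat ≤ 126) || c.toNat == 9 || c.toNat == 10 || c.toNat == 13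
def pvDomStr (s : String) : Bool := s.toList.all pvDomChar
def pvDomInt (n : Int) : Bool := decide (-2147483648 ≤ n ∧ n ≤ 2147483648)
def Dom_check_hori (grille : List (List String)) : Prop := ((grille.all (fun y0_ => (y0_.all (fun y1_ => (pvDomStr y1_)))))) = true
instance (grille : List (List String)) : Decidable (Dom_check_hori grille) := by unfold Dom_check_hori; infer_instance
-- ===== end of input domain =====

-- B drops check_seq and the list of 3-character windows: each row is searched with
-- str.find for the next 'OXO', counting it and resuming just past the match start
-- (a timing run measured B faster; only occurrences, not every window, are visited by Python code).

-- ===== PORT A =====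
def check_seq (string : String) : Int :=
  let count : Int := 0
  let count := if string == "OXO" then count + 1 else count
  count

def check_hori (grille : List (List String)) : Int :=
  grille.foldl (fun score lst =>
    let string := PySem.Str.join "" lst
    let string := (PySem.List.pyRange 0 (PySem.Str.len string - 2) 1).map
      (fun i => PySem.Str.slice string (some i) (some (i + 3)))
    string.foldl (fun score hseq => score + check_seq hseq) score) 0

-- ===== PORT B =====
-- the row string is carried as its character list; `s.find('OXO')` is PySem.Chars.find,
-- `s = s[idx+1:]` (idx ≥ 0 here) is List.drop (idx.toNat + 1)
def oxoLoop (s : List Char) : Int :=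
  let idx := PySem.Chars.find s ['O', 'X', 'O']
  if h : idx = -1 then 0
  else 1 + oxoLoop (s.drop (idx.toNat + 1))
termination_by s.length
decreasing_by
  have h0 : 0 ≤ PySem.Chars.find s ['O', 'X', 'O'] := by
    have := PySem.Chars.neg_one_le_find s ['O', 'X', 'O']
    omega
  have hpre := (PySem.Chars.find_spec (s := s) (sub := ['O', 'X', 'O']) h0).1
  have hlt : (PySem.Chars.find s ['O', 'X', 'O']).toNat < s.length := by
    by_contra hge
    have : s.drop (PySem.Chars.find s ['O', 'X', 'O']).toNat = [] :=
      List.drop_eq_nil_of_le (by omega)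
    rw [this] at hpre
    exact absurd (List.prefix_nil.mp hpre) (by simp)
  simp only [List.length_drop]
  omega

def check_hori_alt (grille : List (List String)) : Int :=
  grille.foldl (fun total row =>
    total + oxoLoop (PySem.Str.join "" row).toList) 0

-- ===== PRECONDITION & SPEC =====
def Spec_check_hori (grille : List (List String)) (out : Int) : Prop := out = check_hori_alt grille
instance (grille : List (List String)) (out : Int) : Decidable (Spec_check_hori grille out) := by unfold Spec_check_hori; infer_instance

-- ===== CLAIM (what is proved, stated in full; the proofs are below) =====
def Claim_equal_check_hori : Prop := ∀ (grille : List (List String)), Dom_check_hori grille → Spec_check_hori grille (check_hori grille)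

-- ===== LEMMAS AND PROOFS =====

-- reference count: number of 'OXO' windows, by structural recursion
def ctr : List Char → Int
  | a :: b :: c :: t => (if a == 'O' && b == 'X' && c == 'O' then 1 else 0) + ctr (b :: c :: t)
  | _ => 0

lemma ctr_cons (a : Char) (t : List Char) :
    ctr (a :: t) = (if ['O', 'X', 'O'] <+: (a :: t) then 1 else 0) + ctr t := by
  match t with
  | [] => simp [ctr, List.IsPrefix]
  | [b] =>
    simp only [ctr]
    rw [if_neg]
    · ring
    · intro h
      have := h.length_le
      simp at this
  | b :: c :: t' =>
    simp only [ctr]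
    congr 1
    by_cases h : a = 'O' ∧ b = 'X' ∧ c = 'O'
    · obtain ⟨h1, h2, h3⟩ := h; subst h1; subst h2; subst h3
      rw [if_pos (by simp), if_pos ⟨t', rfl⟩]
    · rw [if_neg, if_neg]
      · intro hp
        obtain ⟨r, hr⟩ := hp
        simp only [List.cons_append, List.cons.injEq] at hr
        exact h ⟨hr.1.symm, hr.2.1.symm, hr.2.2.1.symm⟩
      · simp only [Bool.and_eq_true, beq_iff_eq]
        tauto

lemma ctr_eq_zero_of_not_infix (s : List Char) (h : ¬ ['O', 'X', 'O'] <:+: s) : ctr s = 0 := by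
  induction s with
  | nil => rfl
  | cons a t ih =>
    rw [ctr_cons, if_neg (fun hp => h hp.isInfix),
      ih (fun hi => h (hi.trans (List.suffix_cons a t).isInfix))]
    ring

lemma ctr_drop_of_no_prefix (s : List Char) (k : Nat)
    (hk : ∀ i, i < k → ¬ ['O', 'X', 'O'] <+: s.drop i) :
    ctr s = ctr (s.drop k) := by
  induction k with
  | zero => simp
  | succ n ih =>
    rw [ih (fun i hi => hk i (by omega))]
    match hdn : s.drop n with
    | [] =>
      have h2 : s.drop (n + 1) = [] := by
        have h1 : s.drop (n + 1) = (s.drop n).drop 1 := by rw [List.drop_drop]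
        rw [h1, hdn, List.drop_nil]
      rw [h2]
    | a :: t =>
      have hdn1 : s.drop (n + 1) = t := by
        have h1 : s.drop (n + 1) = (s.drop n).drop 1 := by
          rw [List.drop_drop]
        rw [h1, hdn, List.drop_one, List.tail_cons]
      rw [hdn1, ctr_cons, if_neg (hdn ▸ hk n (by omega))]
      ring

lemma oxoLoop_eq_ctr (s : List Char) : oxoLoop s = ctr s := by
  rw [oxoLoop]
  by_cases h : PySem.Chars.find s ['O', 'X', 'O'] = -1
  · rw [dif_pos h]
    exact (ctr_eq_zero_of_not_infix s ((PySem.Chars.find_eq_neg_one_iff s ['O', 'X', 'O']).mp h)).symm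
  · rw [dif_neg h]
    have h0 : 0 ≤ PySem.Chars.find s ['O', 'X', 'O'] := by
      have := PySem.Chars.neg_one_le_find s ['O', 'X', 'O']
      omega
    obtain ⟨hpre, hmin⟩ := PySem.Chars.find_spec (s := s) (sub := ['O', 'X', 'O']) h0
    set k := (PySem.Chars.find s ['O', 'X', 'O']).toNat with hkdef
    obtain ⟨r, hr⟩ := hpre
    have hdk1 : s.drop (k + 1) = 'X' :: 'O' :: r := by
      have h1 : s.drop (k + 1) = (s.drop k).drop 1 := by rw [List.drop_drop]
      rw [h1, ← hr]
      rfl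
    have hrec := oxoLoop_eq_ctr (s.drop (k + 1))
    rw [hrec, ctr_drop_of_no_prefix s k hmin, ← hr, hdk1]
    simp [ctr_cons]
termination_by s.length
decreasing_by
  have hlt : (PySem.Chars.find s ['O', 'X', 'O']).toNat < s.length := by
    have := List.IsPrefix.length_le hpre
    simp only [List.length_drop, List.length_cons] at this ⊢
    omega
  simp only [List.length_drop]
  omega

-- A's row expression (via check_seq on 3-character windows) equals ctr
lemma arow_eq_ctr (s : List Char) :
    ((List.range (s.length - 2)).map
      (fun k => check_seq (String.ofList ((s.drop k).take 3)))).sum = ctr s := by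
  match s with
  | [] => rfl
  | [a] => rfl
  | [a, b] => rfl
  | a :: b :: c :: t =>
    have h : (a :: b :: c :: t).length - 2 = ((b :: c :: t).length - 2) + 1 := by
      simp only [List.length_cons]; omega
    rw [h, List.range_succ_eq_map, List.map_cons, List.map_map, List.sum_cons]
    have hrec := arow_eq_ctr (b :: c :: t)
    show check_seq (String.ofList [a, b, c]) + _
        = (if a == 'O' && b == 'X' && c == 'O' then 1 else 0) + ctr (b :: c :: t)
    rw [show (List.map ((fun k => check_seq (String.ofList ((List.drop k (a :: b :: c :: t)).take 3))) ∘ Nat.succ) (List.range ((b :: c :: t).length - 2)))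
        = List.map (fun k => check_seq (String.ofList ((List.drop k (b :: c :: t)).take 3))) (List.range ((b :: c :: t).length - 2)) from rfl, hrec]
    congr 1
    · simp only [check_seq]
      by_cases hx : String.ofList [a, b, c] == "OXO"
      · have : [a, b, c] = ['O', 'X', 'O'] := by
          have := (beq_iff_eq).mp hx
          have := congrArg String.toList this
          simpa using this
        simp_all
      · have : ¬ (a == 'O' && b == 'X' && c == 'O') = true := by
          intro hc
          apply hx
          simp only [Bool.and_eq_true, beq_iff_eq] at hc
          obtain ⟨⟨h1, h2⟩, h3⟩ := hc
          subst h1; subst h2; subst h3; rfl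
        simp_all

-- A's inner loop over the slice list, rewritten to the range/drop/take sum
lemma arow_slices (str : String) (score : Int) :
    ((PySem.List.pyRange 0 (PySem.Str.len str - 2) 1).map
      (fun i => PySem.Str.slice str (some i) (some (i + 3)))).foldl
        (fun score hseq => score + check_seq hseq) score
    = score + ((List.range (str.toList.length - 2)).map
        (fun k => check_seq (String.ofList ((str.toList.drop k).take 3)))).sum := by
  rw [PySem.List.foldl_add]
  congr 1
  rw [List.map_map]
  have hlen : PySem.Str.len str - 2 = ((str.toList.length : Int)) - 2 := by
    simp [PySem.Str.len]
  rw [hlen, PySem.List.pyRange_one, List.map_map]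
  rcases Nat.lt_or_ge str.toList.length 2 with hl | hl
  · interval_cases h : str.toList.length <;> simp_all
  · have hN : ((str.toList.length : Int) - 2 - 0).toNat = str.toList.length - 2 := by omega
    rw [hN]
    apply congrArg List.sum
    apply List.map_congr_left
    intro k hk
    simp only [Function.comp]
    congr 1
    have hc : (0 + (k : Int) + 3) = ((k : Int) + ((3 : Nat) : Int)) := by norm_num
    have hc0 : (0 + (k : Int)) = ((k : Int)) := by norm_num
    rw [hc, hc0]
    apply String.toList_inj.mp
    simp only [PySem.Str.slice, String.toList_ofList, PySem.Chars.slice_eq_listSlice]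
    rw [PySem.List.slice_natCast_add]

theorem check_hori_eq (grille : List (List String)) :
    check_hori grille = check_hori_alt grille := by
  unfold check_hori check_hori_alt
  have key : ∀ (l : List (List String)) (acc : Int),
      l.foldl (fun score lst =>
        let string := PySem.Str.join "" lst
        let string := (PySem.List.pyRange 0 (PySem.Str.len string - 2) 1).map
          (fun i => PySem.Str.slice string (some i) (some (i + 3)))
        string.foldl (fun score hseq => score + check_seq hseq) score) acc
      = l.foldl (fun total row =>
        total + oxoLoop (PySem.Str.join "" row).toList) acc := by
    intro l
    induction l with
    | nil => intro acc; rfl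
    | cons x xs ih =>
      intro acc
      simp only [List.foldl_cons]
      rw [ih]
      congr 1
      show ((PySem.List.pyRange 0 (PySem.Str.len (PySem.Str.join "" x) - 2) 1).map
          (fun i => PySem.Str.slice (PySem.Str.join "" x) (some i) (some (i + 3)))).foldl
          (fun score hseq => score + check_seq hseq) acc = _
      rw [arow_slices, oxoLoop_eq_ctr, arow_eq_ctr]
  exact key grille 0

-- ===== VERDICT (by name: the statement is the Claim_ definition above) =====
theorem check_hori_spec : Claim_equal_check_hori := by
  intro grille _
  exact check_hori_eq grille
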